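-- pv_equiv track=rewrite | github.com/ax-foundry/axion | axion/docs/render/documentation_button.py | _replace_blockquotes
-- ===== SOURCE A (Python) =====
-- def _replace_blockquotes(text: str) -> str:
--     """Replace markdown blockquotes with HTML."""
--     lines = text.split('\n')
--     result = []
--     in_blockquote = False
--
--     for line in lines:
--         if line.startswith('> '):
--             if not in_blockquote:
--                 result.append('<blockquote>')
--                 in_blockquote = True
--             content = line[2:]  # Remove '> '
--             result.append(f'<p>{content}</p>')
--         else:
--             if in_blockquote:
--                 result.append('</blockquote>')
--                 in_blockquote = False
--             result.append(line)
--
--     if in_blockquote: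
--         result.append('</blockquote>')
--
--     return '\n'.join(result)
-- ===== SOURCE B (Python) =====
-- def _replace_blockquotes(text: str) -> str:
--     """Replace markdown blockquotes with HTML (run-based: process maximal runs of quote-marker lines)."""
--     lines = text.split('\n')
--     out = []
--     i = 0
--     n = len(lines)
--     while i < n:
--         if lines[i].startswith('> '):
--             j = i
--             while j < n and lines[j].startswith('> '):
--                 j += 1
--             out.append('<blockquote>')
--             for line in lines[i:j]:
--                 out.append('<p>' + line[2:] + '</p>')
--             out.append('</blockquote>')
--             i = j
--         else:
--             out.append(lines[i])
--             i += 1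
--     return '\n'.join(out)
-- ===== Notes on version B (the rewrite author's own statement) =====
-- stated objective: alternative
-- what changed: Replaces A's in_blockquote flag and trailing flush with a single run-based pass: an inner scan finds each maximal run of blockquote-marker lines and emits it as one blockquote element.
import Mathlib
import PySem

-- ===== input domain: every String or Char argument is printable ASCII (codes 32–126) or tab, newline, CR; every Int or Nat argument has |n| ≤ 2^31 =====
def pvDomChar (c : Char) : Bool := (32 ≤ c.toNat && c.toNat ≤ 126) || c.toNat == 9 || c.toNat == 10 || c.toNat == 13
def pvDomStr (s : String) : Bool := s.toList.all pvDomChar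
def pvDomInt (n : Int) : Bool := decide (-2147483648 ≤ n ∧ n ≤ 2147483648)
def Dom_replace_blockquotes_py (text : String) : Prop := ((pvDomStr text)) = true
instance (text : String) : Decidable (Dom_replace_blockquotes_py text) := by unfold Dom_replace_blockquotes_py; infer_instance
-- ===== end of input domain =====

-- B replaces A's in_blockquote flag + trailing flush with a run-based pass over maximal
-- runs of quote-marker lines (objective: alternative decomposition, same cost).

-- ===== PORT A =====
-- A's for-loop over the lines, carrying (result, in_blockquote)
def pvLoopA : List String → List String × Bool → List String × Bool
  | [], st => st
  | line :: ls, (result, inb) =>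
    if PySem.Str.startswith line "> " then
      let result := if !inb then result ++ ["<blockquote>"] else result
      pvLoopA ls (result ++ ["<p>" ++ PySem.Str.slice line (some 2) none ++ "</p>"], true)
    else
      let result := if inb then result ++ ["</blockquote>"] else result
      pvLoopA ls (result ++ [line], false)

def replace_blockquotes_py (text : String) : String :=
  let lines := (PySem.Str.split? text "\n").getD []
  let st := pvLoopA lines ([], false)
  let result := if st.2 then st.1 ++ ["</blockquote>"] else st.1
  PySem.Str.join "\n" result

-- ===== PORT B =====
-- B's outer while-loop: at a '> ' line, the inner while-loop scans the maximal run
-- (takeWhile/dropWhile), emitted as one <blockquote> block; otherwise copy the line.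
def pvIsQ (line : String) : Bool := PySem.Str.startswith line "> "

def pvRunsB : List String → List String
  | [] => []
  | line :: ls =>
    if _h : pvIsQ line then
      ["<blockquote>"]
        ++ ((line :: ls).takeWhile pvIsQ).map
             (fun l => "<p>" ++ PySem.Str.slice l (some 2) none ++ "</p>")
        ++ ["</blockquote>"] ++ pvRunsB ((line :: ls).dropWhile pvIsQ)
    else
      line :: pvRunsB ls
  termination_by ls => ls.length
  decreasing_by
    · rw [List.dropWhile_cons_of_pos _h]
      exact Nat.lt_succ_of_le (List.length_dropWhile_le pvIsQ ls)
    · simp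

def replace_blockquotes_py_alt (text : String) : String :=
  PySem.Str.join "\n" (pvRunsB ((PySem.Str.split? text "\n").getD []))

-- ===== PRECONDITION & SPEC =====
def Spec_replace_blockquotes_py (text : String) (out : String) : Prop := out = replace_blockquotes_py_alt text
instance (text : String) (out : String) : Decidable (Spec_replace_blockquotes_py text out) := by unfold Spec_replace_blockquotes_py; infer_instance

-- ===== CLAIM (what is proved, stated in full; the proofs are below) =====
def Claim_equal_replace_blockquotes_py : Prop := ∀ (text : String), Dom_replace_blockquotes_py text → Spec_replace_blockquotes_py text (replace_blockquotes_py text)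

-- ===== LEMMAS AND PROOFS =====

theorem pvFlush_append (st : List String × Bool) :
    (if st.2 = true then st.1 ++ ["</blockquote>"] else st.1) =
      st.1 ++ (if st.2 = true then ["</blockquote>"] else []) := by
  rcases st with ⟨l, b⟩; cases b <;> simp

-- A's loop appends to its accumulator
theorem pvLoopA_acc (ls : List String) (acc : List String) (inb : Bool) :
    (pvLoopA ls (acc, inb)).1 = acc ++ (pvLoopA ls ([], inb)).1 ∧
    (pvLoopA ls (acc, inb)).2 = (pvLoopA ls ([], inb)).2 := by
  induction ls generalizing acc inb with
  | nil => simp [pvLoopA]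
  | cons line ls ih =>
    simp only [pvLoopA]
    by_cases hq : PySem.Str.startswith line "> " = true <;>
      cases inb <;>
      simp only [hq, if_pos, Bool.not_true, Bool.not_false, if_false,
        Bool.false_eq_true, List.nil_append] <;>
      refine ⟨?_, ?_⟩
    all_goals first
      | (rw [(ih _ _).2]; (conv_rhs => rw [(ih _ _).2]))
      | (rw [(ih _ _).1]; (conv_rhs => rw [(ih _ _).1]); simp)

def pvP (l : String) : String := "<p>" ++ PySem.Str.slice l (some 2) none ++ "</p>"

-- A's flag-carrying loop (with the final flush) equals B's run-based pass
theorem pvLoopA_eq_runsB (ls : List String) :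
    ((if (pvLoopA ls ([], false)).2 then
        (pvLoopA ls ([], false)).1 ++ ["</blockquote>"]
      else (pvLoopA ls ([], false)).1) = pvRunsB ls) ∧
    ((pvLoopA ls ([], true)).1 ++ (if (pvLoopA ls ([], true)).2 then ["</blockquote>"] else []) =
      (ls.takeWhile pvIsQ).map pvP ++ ["</blockquote>"] ++ pvRunsB (ls.dropWhile pvIsQ)) := by
  induction ls with
  | nil => simp [pvLoopA, pvRunsB]
  | cons line ls ih =>
    by_cases hq : pvIsQ line = true
    · have hq' : PySem.Chars.startswith line.toList ['>', ' '] = true := by simpa using hq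
      have hstep : ∀ inb : Bool, pvLoopA (line :: ls) ([], inb) =
          pvLoopA ls ((if inb then [] else ["<blockquote>"]) ++ [pvP line], true) := by
        intro inb; cases inb <;> simp [pvLoopA, hq', pvP]
      constructor
      · rw [pvFlush_append, hstep false, (pvLoopA_acc ls _ true).1, (pvLoopA_acc ls _ true).2,
          List.append_assoc, ih.2, pvRunsB]
        rw [dif_pos hq, List.takeWhile_cons_of_pos hq, List.dropWhile_cons_of_pos hq]
        simp [pvP]
      · rw [hstep true, (pvLoopA_acc ls _ true).1, (pvLoopA_acc ls _ true).2,
          List.append_assoc, ih.2]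
        rw [List.takeWhile_cons_of_pos hq, List.dropWhile_cons_of_pos hq]
        simp
    · have hq' : ¬ PySem.Chars.startswith line.toList ['>', ' '] = true := by simpa using hq
      have hstep : ∀ inb : Bool, pvLoopA (line :: ls) ([], inb) =
          pvLoopA ls ((if inb then ["</blockquote>"] else []) ++ [line], false) := by
        intro inb; cases inb <;> simp [pvLoopA, hq']
      constructor
      · rw [pvFlush_append, hstep false, (pvLoopA_acc ls _ false).1, (pvLoopA_acc ls _ false).2,
          List.append_assoc, ← pvFlush_append, ih.1, pvRunsB]
        rw [dif_neg hq]
        simp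
      · rw [hstep true, (pvLoopA_acc ls _ false).1, (pvLoopA_acc ls _ false).2,
          List.append_assoc, ← pvFlush_append, ih.1]
        rw [List.takeWhile_cons_of_neg hq, List.dropWhile_cons_of_neg hq, pvRunsB, dif_neg hq]
        simp

-- ===== VERDICT (by name: the statement is the Claim_ definition above) =====
theorem replace_blockquotes_py_spec : Claim_equal_replace_blockquotes_py := by
  intro text _
  show PySem.Str.join "\n"
      (if (pvLoopA ((PySem.Str.split? text "\n").getD []) ([], false)).2 then
        (pvLoopA ((PySem.Str.split? text "\n").getD []) ([], false)).1 ++ ["</blockquote>"]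
      else (pvLoopA ((PySem.Str.split? text "\n").getD []) ([], false)).1) =
    replace_blockquotes_py_alt text
  rw [(pvLoopA_eq_runsB _).1]
  rfl
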